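-- pv_equiv track=rewrite | github.com/jcraig949jfi/Prometheus | cartography/shared/scripts/v2/genus2_c2_fast.py | count_fp2_affine_fast
-- ===== SOURCE A (Python) =====
-- def fp2_mul(a, b, p, g):
--     """Multiply two F_{p^2} elements (tuples)."""
--     return ((a[0]*b[0] + g*a[1]*b[1]) % p, (a[0]*b[1] + a[1]*b[0]) % p)
--
-- def fp2_add(a, b, p):
--     return ((a[0]+b[0]) % p, (a[1]+b[1]) % p)
--
-- def eval_poly_fp2_fast(coeffs_dict, x, p, g):
--     """Evaluate polynomial at x in F_{p^2} using Horner's method."""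
--     if not coeffs_dict:
--         return (0, 0)
--     max_deg = max(coeffs_dict.keys())
--     # Horner: start from highest degree
--     result = (coeffs_dict.get(max_deg, 0) % p, 0)
--     for d in range(max_deg - 1, -1, -1):
--         result = fp2_mul(result, x, p, g)
--         c = coeffs_dict.get(d, 0) % p
--         result = ((result[0] + c) % p, result[1])
--     return result
--
-- def count_fp2_affine_fast(f_coeffs, h_coeffs, p, g):
--     """
--     Count affine points on y^2 + h(x)*y = f(x) over F_{p^2}.
--     Uses norm trick: disc = (da, db) is a square in F_{p^2} iff
--     N(disc) = da^2 - g*db^2 is a square in F_p.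
--     """
--     count = 0
--     # Precompute Legendre symbol table for F_p
--     # ls[x] = 1 if x is QR, -1 if NQR, 0 if 0
--     ls = [0] * p
--     for x in range(1, p):
--         ls[x] = 1 if pow(x, (p - 1) // 2, p) == 1 else -1
--
--     for a in range(p):
--         for b in range(p):
--             x = (a, b)
--             fv = eval_poly_fp2_fast(f_coeffs, x, p, g)
--             hv = eval_poly_fp2_fast(h_coeffs, x, p, g)
--
--             # disc = h^2 + 4f in F_{p^2}
--             h2 = fp2_mul(hv, hv, p, g)
--             f4 = ((4 * fv[0]) % p, (4 * fv[1]) % p)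
--             disc = fp2_add(h2, f4, p)
--
--             da, db = disc
--             if da == 0 and db == 0:
--                 count += 1  # disc = 0: one solution
--             else:
--                 # Norm: N(disc) = da^2 - g*db^2 mod p
--                 norm = (da * da - g * db * db) % p
--                 if norm == 0:
--                     # Norm is 0 but disc != 0 means disc is a zero divisor?
--                     # No: in F_{p^2} there are no zero divisors. If norm=0
--                     # and disc != 0, then... actually this can't happen.
--                     # N(z) = z * z^p. If N(z) = 0, then z = 0.
--                     # But we already checked z = 0. So this is an error.
--                     pass
--                 elif ls[norm] == 1:
--                     count += 2  # disc is a nonzero square: two solutions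
--                 # else: disc is a non-square: zero solutions
--
--     return count
-- ===== SOURCE B (Python) =====
-- def _poly_add(a, b):
--     if len(a) < len(b):
--         a, b = b, a
--     return [x + y for x, y in zip(a, b)] + a[len(b):]
--
-- def _poly_mul(a, b):
--     out = []
--     for x in reversed(a):
--         out = _poly_add([x * c for c in b], [0] + out)
--     return out
--
-- def _dense(coeffs):
--     """Dense low-to-high integer coefficient list of the polynomial the dict describes."""
--     if not coeffs:
--         return []
--     top = max(coeffs)
--     return [coeffs.get(d, 0) for d in range(top)] + [coeffs.get(top, 0)]
--
-- def count_fp2_affine_fast(f_coeffs, h_coeffs, p, g):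
--     df = _dense(f_coeffs)
--     dh = _dense(h_coeffs)
--     # disc(x) = h(x)^2 + 4*f(x): build its coefficients once, symbolically over Z,
--     # so each point needs a single Horner evaluation instead of two plus a product.
--     dd = _poly_add(_poly_mul(dh, dh), [4 * c for c in df])
--     qr = {x for x in range(1, p) if pow(x, (p - 1) // 2, p) == 1}
--     count = 0
--     for a in range(p):
--         for b in range(p):
--             da, db = 0, 0
--             for c in reversed(dd):
--                 da, db = (da * a + g * db * b + c) % p, (da * b + db * a) % p
--             if da == 0 and db == 0:
--                 count += 1
--             elif (da * da - g * db * db) % p in qr: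
--                 count += 2
--     return count
-- ===== Notes on version B (the rewrite author's own statement) =====
-- stated objective: alternative
-- what changed: B precomputes the discriminant polynomial h^2+4f once by symbolic polynomial arithmetic over Z and replaces A's per-point pair of dict-driven Horner evaluations plus an F_{p^2} multiplication with a single inline Horner pass per point, and replaces the Legendre table by a set of quadratic residues.
import Mathlib
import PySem

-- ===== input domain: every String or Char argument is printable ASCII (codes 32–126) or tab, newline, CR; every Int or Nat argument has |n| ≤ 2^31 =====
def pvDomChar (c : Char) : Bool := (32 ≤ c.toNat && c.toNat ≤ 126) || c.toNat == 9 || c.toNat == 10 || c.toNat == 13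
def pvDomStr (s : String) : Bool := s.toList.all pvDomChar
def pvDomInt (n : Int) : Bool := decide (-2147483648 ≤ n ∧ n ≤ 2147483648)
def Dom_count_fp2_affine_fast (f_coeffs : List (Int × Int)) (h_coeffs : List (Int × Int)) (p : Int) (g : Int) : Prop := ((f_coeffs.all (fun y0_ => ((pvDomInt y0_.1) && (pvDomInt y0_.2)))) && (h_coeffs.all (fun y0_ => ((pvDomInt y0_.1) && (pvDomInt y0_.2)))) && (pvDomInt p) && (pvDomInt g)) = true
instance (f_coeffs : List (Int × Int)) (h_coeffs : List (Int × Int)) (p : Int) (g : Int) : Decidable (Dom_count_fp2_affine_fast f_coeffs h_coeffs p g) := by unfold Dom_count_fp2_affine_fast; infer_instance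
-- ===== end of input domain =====

-- B builds the discriminant polynomial h^2+4f once (symbolic arithmetic over Z) and does a
-- single Horner evaluation per point with a residue set instead of A's two dict-driven
-- evaluations, an F_{p^2} product and a Legendre table: an alternative algorithm of similar cost.


-- ===== PORT A =====
def fp2_mul (a b : Int × Int) (p g : Int) : Int × Int :=
  (PySem.Int.mod (a.1 * b.1 + g * a.2 * b.2) p, PySem.Int.mod (a.1 * b.2 + a.2 * b.1) p)

def fp2_add (a b : Int × Int) (p : Int) : Int × Int :=
  (PySem.Int.mod (a.1 + b.1) p, PySem.Int.mod (a.2 + b.2) p)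

-- 'if not coeffs_dict: return (0,0)' coincides with max? of the keys being none
def eval_poly_fp2_fast (d : PySem.Dict Int Int) (x : Int × Int) (p g : Int) : Int × Int :=
  match PySem.List.max? d.keys (fun k => k) with
  | none => (0, 0)
  | some md =>
    (PySem.List.pyRange (md - 1) (-1) (-1)).foldl
      (fun r dd =>
        let r' := fp2_mul r x p g
        let c := PySem.Int.mod (d.getD dd 0) p
        (PySem.Int.mod (r'.1 + c) p, r'.2))
      (PySem.Int.mod (d.getD md 0) p, 0)

def count_fp2_affine_fast (f_coeffs : List (Int × Int)) (h_coeffs : List (Int × Int)) (p : Int) (g : Int) : Int :=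
  let fd : PySem.Dict Int Int := PySem.Dict.ofList f_coeffs
  let hd : PySem.Dict Int Int := PySem.Dict.ofList h_coeffs
  let ls : List Int :=
    (PySem.List.pyRange 1 p 1).foldl
      (fun ls x =>
        ls.set x.toNat (if PySem.Int.powMod x (PySem.Int.floordiv (p - 1) 2).toNat p = 1 then 1 else -1))
      (List.replicate p.toNat 0)
  (PySem.List.pyRange 0 p 1).foldl (fun count a =>
    (PySem.List.pyRange 0 p 1).foldl (fun count b =>
      let x := (a, b)
      let fv := eval_poly_fp2_fast fd x p g
      let hv := eval_poly_fp2_fast hd x p g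
      let h2 := fp2_mul hv hv p g
      let f4 := (PySem.Int.mod (4 * fv.1) p, PySem.Int.mod (4 * fv.2) p)
      let disc := fp2_add h2 f4 p
      if disc.1 = 0 ∧ disc.2 = 0 then count + 1
      else
        let norm := PySem.Int.mod (disc.1 * disc.1 - g * disc.2 * disc.2) p
        if norm = 0 then count
        else if PySem.List.pyGet? ls norm = some 1 then count + 2
        else count) count) 0

-- ===== PORT B =====
def polyAdd (a b : List Int) : List Int :=
  if a.length < b.length then List.zipWith (· + ·) b a ++ b.drop a.length
  else List.zipWith (· + ·) a b ++ a.drop b.length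

-- 'for x in reversed(a): out = _poly_add([x*c for c in b], [0] + out)' is a right fold over a
def polyMul (a b : List Int) : List Int :=
  a.foldr (fun x out => polyAdd (b.map (fun c => x * c)) (0 :: out)) []

def denseOf (d : PySem.Dict Int Int) : List Int :=
  match PySem.List.max? d.keys (fun k => k) with
  | none => []
  | some top => (PySem.List.pyRange 0 top 1).map (fun dd => d.getD dd 0) ++ [d.getD top 0]

def count_fp2_affine_fast_alt (f_coeffs : List (Int × Int)) (h_coeffs : List (Int × Int)) (p : Int) (g : Int) : Int :=
  let fd : PySem.Dict Int Int := PySem.Dict.ofList f_coeffs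
  let hd : PySem.Dict Int Int := PySem.Dict.ofList h_coeffs
  let dh := denseOf hd
  let dd := polyAdd (polyMul dh dh) ((denseOf fd).map (fun c => 4 * c))
  let qr : PySem.Set Int := PySem.Set.ofList
    ((PySem.List.pyRange 1 p 1).filter
      (fun x => PySem.Int.powMod x (PySem.Int.floordiv (p - 1) 2).toNat p == 1))
  (PySem.List.pyRange 0 p 1).foldl (fun count a =>
    (PySem.List.pyRange 0 p 1).foldl (fun count b =>
      let r := dd.reverse.foldl
        (fun r c => (PySem.Int.mod (r.1 * a + g * r.2 * b + c) p,
                     PySem.Int.mod (r.1 * b + r.2 * a) p))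
        ((0 : Int), (0 : Int))
      if r.1 = 0 ∧ r.2 = 0 then count + 1
      else if PySem.Set.contains qr (PySem.Int.mod (r.1 * r.1 - g * r.2 * r.2) p) then count + 2
      else count) count) 0

-- ===== PRECONDITION & SPEC =====
def Spec_count_fp2_affine_fast (f_coeffs : List (Int × Int)) (h_coeffs : List (Int × Int)) (p : Int) (g : Int) (out : Int) : Prop := out = count_fp2_affine_fast_alt f_coeffs h_coeffs p g
instance (f_coeffs : List (Int × Int)) (h_coeffs : List (Int × Int)) (p : Int) (g : Int) (out : Int) : Decidable (Spec_count_fp2_affine_fast f_coeffs h_coeffs p g out) := by unfold Spec_count_fp2_affine_fast; infer_instance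

-- ===== CLAIM (what is proved, stated in full; the proofs are below) =====
def Claim_equal_count_fp2_affine_fast : Prop := ∀ (f_coeffs : List (Int × Int)) (h_coeffs : List (Int × Int)) (p : Int) (g : Int), Dom_count_fp2_affine_fast f_coeffs h_coeffs p g → Spec_count_fp2_affine_fast f_coeffs h_coeffs p g (count_fp2_affine_fast f_coeffs h_coeffs p g)

-- ===== LEMMAS AND PROOFS =====


-- step function of B's inline Horner loop
def pvStepB (p g a b : Int) (r : Int × Int) (c : Int) : Int × Int :=
  (PySem.Int.mod (r.1 * a + g * r.2 * b + c) p, PySem.Int.mod (r.1 * b + r.2 * a) p)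

-- unreduced (over Z) evaluation of a dense polynomial at (a, b)
def pvEvalZ (g a b : Int) : List Int → Int × Int
  | [] => (0, 0)
  | c :: cs =>
    let z := pvEvalZ g a b cs
    (z.1 * a + g * z.2 * b + c, z.1 * b + z.2 * a)

theorem pvModEq_mod {p : Int} (hp : 0 < p) (x : Int) : Int.ModEq p (PySem.Int.mod x p) x := by
  rw [PySem.Int.mod_eq_emod_of_pos hp]
  exact Int.emod_emod_of_dvd x dvd_rfl

theorem pvMod_congr {p : Int} (hp : 0 < p) {x y : Int} (h : Int.ModEq p x y) :
    PySem.Int.mod x p = PySem.Int.mod y p := by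
  simpa [PySem.Int.mod_eq_emod_of_pos hp] using h

theorem pvHorner_eq_evalZ (p g a b : Int) (hp : 0 < p) (cs : List Int) :
    cs.reverse.foldl (pvStepB p g a b) (0, 0) =
      (PySem.Int.mod (pvEvalZ g a b cs).1 p, PySem.Int.mod (pvEvalZ g a b cs).2 p) := by
  rw [List.foldl_reverse]
  induction cs with
  | nil =>
    simp [pvEvalZ, PySem.Int.mod_eq_emod_of_pos hp]
  | cons c cs ih =>
    simp only [List.foldr_cons]
    rw [ih]
    simp only [pvEvalZ, pvStepB, Prod.mk.injEq]
    constructor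
    · apply pvMod_congr hp
      exact (((pvModEq_mod hp _).mul_right a).add (((pvModEq_mod hp _).mul_left g).mul_right b)).add_right c
    · apply pvMod_congr hp
      exact ((pvModEq_mod hp _).mul_right b).add ((pvModEq_mod hp _).mul_right a)

theorem pvEvalA_eq (d : PySem.Dict Int Int) (p g a b : Int) (hp : 0 < p) :
    eval_poly_fp2_fast d (a, b) p g = (denseOf d).reverse.foldl (pvStepB p g a b) (0, 0) := by
  unfold eval_poly_fp2_fast denseOf
  cases hm : PySem.List.max? d.keys (fun k => k) with
  | none => simp
  | some md =>
    simp only [List.reverse_append, List.reverse_cons, List.reverse_nil, List.nil_append,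
      List.cons_append, List.foldl_cons]
    have h0 : pvStepB p g a b (0, 0) (d.getD md 0) = (PySem.Int.mod (d.getD md 0) p, 0) := by
      simp only [pvStepB, Prod.mk.injEq]
      constructor
      · rw [show (0 : Int) * a + g * 0 * b + d.getD md 0 = d.getD md 0 from by ring]
      · rw [show (0 : Int) * b + 0 * a = 0 from by ring, PySem.Int.mod_eq_emod_of_pos hp]
        simp
    rw [h0, ← List.map_reverse, List.foldl_map]
    rw [show ((PySem.List.pyRange 0 md).reverse : List Int) =
        PySem.List.pyRange (md - 1) (-1) (-1) from by
      rw [PySem.List.pyRange_neg_one_eq_reverse (md - 1) (-1)]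
      norm_num]
    apply PySem.List.foldl_congr_mem
    intro r dd _
    simp only [pvStepB, fp2_mul, Prod.mk.injEq]
    constructor
    · apply pvMod_congr hp
      exact ((pvModEq_mod hp _).add (pvModEq_mod hp _))
    · trivial

-- recursive form of _poly_add, used only by the proofs
def pvPolyAddRec : List Int → List Int → List Int
  | [], b => b
  | a, [] => a
  | a :: as, b :: bs => (a + b) :: pvPolyAddRec as bs

theorem pvPolyAdd_eq (a : List Int) : ∀ b, polyAdd a b = pvPolyAddRec a b := by
  induction a with
  | nil => intro b; cases b <;> simp [polyAdd, pvPolyAddRec]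
  | cons x xs ih =>
    intro b
    cases b with
    | nil => simp [polyAdd, pvPolyAddRec]
    | cons y ys =>
      have h := ih ys
      by_cases hl : xs.length < ys.length
      · simp only [polyAdd, if_pos hl] at h
        simp only [polyAdd, List.length_cons, add_lt_add_iff_right, if_pos hl,
          List.zipWith_cons_cons, List.drop_succ_cons, List.cons_append, pvPolyAddRec]
        exact List.cons_eq_cons.mpr ⟨by ring, h⟩
      · simp only [polyAdd, if_neg hl] at h
        simp only [polyAdd, List.length_cons, add_lt_add_iff_right, if_neg hl,
          List.zipWith_cons_cons, List.drop_succ_cons, List.cons_append, pvPolyAddRec]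
        exact List.cons_eq_cons.mpr ⟨rfl, h⟩

theorem pvEvalZ_polyAdd (g a b : Int) (P Q : List Int) :
    pvEvalZ g a b (polyAdd P Q) =
      ((pvEvalZ g a b P).1 + (pvEvalZ g a b Q).1, (pvEvalZ g a b P).2 + (pvEvalZ g a b Q).2) := by
  rw [pvPolyAdd_eq]
  induction P generalizing Q with
  | nil => simp [pvPolyAddRec, pvEvalZ]
  | cons c cs ih =>
    cases Q with
    | nil => simp [pvPolyAddRec, pvEvalZ]
    | cons c' cs' =>
      simp only [pvPolyAddRec, pvEvalZ, ih, Prod.mk.injEq]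
      constructor <;> ring

theorem pvEvalZ_map_mul (g a b k : Int) (Q : List Int) :
    pvEvalZ g a b (Q.map (fun c => k * c)) =
      (k * (pvEvalZ g a b Q).1, k * (pvEvalZ g a b Q).2) := by
  induction Q with
  | nil => simp [pvEvalZ]
  | cons c cs ih =>
    simp only [List.map_cons, pvEvalZ, ih, Prod.mk.injEq]
    constructor <;> ring

theorem pvEvalZ_polyMul (g a b : Int) (P Q : List Int) :
    pvEvalZ g a b (polyMul P Q) =
      ((pvEvalZ g a b P).1 * (pvEvalZ g a b Q).1 + g * (pvEvalZ g a b P).2 * (pvEvalZ g a b Q).2,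
       (pvEvalZ g a b P).1 * (pvEvalZ g a b Q).2 + (pvEvalZ g a b P).2 * (pvEvalZ g a b Q).1) := by
  induction P with
  | nil => simp [polyMul, pvEvalZ]
  | cons c cs ih =>
    simp only [polyMul, List.foldr_cons] at ih ⊢
    simp only [pvEvalZ_polyAdd, pvEvalZ_map_mul, pvEvalZ, ih, Prod.mk.injEq]
    constructor <;> ring

-- value written into A's Legendre table at index x
def pvLsVal (p x : Int) : Int :=
  if PySem.Int.powMod x (PySem.Int.floordiv (p - 1) 2).toNat p = 1 then 1 else -1

theorem pvFoldlSet_length (v : Int → Int) (xs : List Int) (acc : List Int) :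
    (xs.foldl (fun l x => l.set x.toNat (v x)) acc).length = acc.length := by
  induction xs generalizing acc with
  | nil => rfl
  | cons x xs ih => simp [List.foldl_cons, ih, List.length_set]

theorem pvFoldlSet_get_notmem (v : Int → Int) (xs : List Int) (acc : List Int) (j : Nat)
    (h0 : ∀ x ∈ xs, 0 ≤ x) (hj : ∀ x ∈ xs, x ≠ (j : Int)) :
    (xs.foldl (fun l x => l.set x.toNat (v x)) acc)[j]? = acc[j]? := by
  induction xs generalizing acc with
  | nil => rfl
  | cons x xs ih =>
    simp only [List.foldl_cons]
    rw [ih _ (fun y hy => h0 y (List.mem_cons_of_mem _ hy)) (fun y hy => hj y (List.mem_cons_of_mem _ hy))]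
    apply List.getElem?_set_ne
    have hx0 := h0 x (List.mem_cons_self)
    have hxj := hj x (List.mem_cons_self)
    omega

theorem pvFoldlSet_get_mem (v : Int → Int) (xs : List Int) (acc : List Int) (j : Nat)
    (hnd : xs.Nodup) (h0 : ∀ x ∈ xs, 0 ≤ x) (hj : (j : Int) ∈ xs) (hlen : j < acc.length) :
    (xs.foldl (fun l x => l.set x.toNat (v x)) acc)[j]? = some (v (j : Int)) := by
  induction xs generalizing acc with
  | nil => simp at hj
  | cons x xs ih =>
    simp only [List.foldl_cons]
    rcases List.mem_cons.mp hj with hx | hx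
    · have hnotin : ∀ y ∈ xs, y ≠ (j : Int) := by
        intro y hy
        have := (List.nodup_cons.mp hnd).1
        intro he; rw [he, hx] at hy; exact this hy
      rw [pvFoldlSet_get_notmem v xs _ j (fun y hy => h0 y (List.mem_cons_of_mem _ hy)) hnotin]
      rw [← hx]
      rw [show ((j : Int)).toNat = j from rfl]
      rw [List.getElem?_set_self (by simpa using hlen)]
    · exact ih _ (List.nodup_cons.mp hnd).2 (fun y hy => h0 y (List.mem_cons_of_mem _ hy)) hx
        (by simpa [List.length_set] using hlen)

-- A's table built by the 'for x in range(1, p)' loop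
def pvLsTable (p : Int) : List Int :=
  (PySem.List.pyRange 1 p 1).foldl
    (fun ls x =>
      ls.set x.toNat (if PySem.Int.powMod x (PySem.Int.floordiv (p - 1) 2).toNat p = 1 then 1 else -1))
    (List.replicate p.toNat 0)

theorem pvLsTable_get (p n : Int) (hp : 0 < p) (h0 : 0 ≤ n) (hn : n < p) :
    PySem.List.pyGet? (pvLsTable p) n = some (if n = 0 then 0 else pvLsVal p n) := by
  have hlen : (pvLsTable p).length = p.toNat := by
    unfold pvLsTable
    rw [pvFoldlSet_length]
    simp
  have hidx : PySem.List.pyGet? (pvLsTable p) n = (pvLsTable p)[n.toNat]? := by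
    simp only [PySem.List.pyGet?, PySem.List.pyIdx?, hlen]
    rw [if_pos h0, if_pos (by omega)]
    rfl
  rw [hidx]
  by_cases hz : n = 0
  · subst hz
    unfold pvLsTable
    rw [pvFoldlSet_get_notmem]
    · simp only [Int.toNat_zero]
      rw [List.getElem?_replicate]
      simp only [if_pos (by omega : 0 < p.toNat)]
      rfl
    · intro x hx; exact le_trans (by norm_num) (PySem.List.mem_pyRange_one.mp hx).1
    · intro x hx
      have := (PySem.List.mem_pyRange_one.mp hx).1
      simp only [Int.toNat_zero, Nat.cast_zero]
      omega
  · unfold pvLsTable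
    have hmem : n ∈ PySem.List.pyRange 1 p 1 := PySem.List.mem_pyRange_one.mpr ⟨by omega, hn⟩
    have : ((n.toNat : Int)) = n := Int.toNat_of_nonneg h0
    rw [show (pvLsVal p n) = pvLsVal p ((n.toNat : Int)) by rw [this]]
    rw [if_neg hz]
    exact pvFoldlSet_get_mem _ _ _ _ (PySem.List.nodup_pyRange_one 1 p)
      (fun x hx => le_trans (by norm_num) (PySem.List.mem_pyRange_one.mp hx).1)
      (by rwa [this]) (by simp; omega)

-- B's residue set
def pvQr (p : Int) : PySem.Set Int :=
  PySem.Set.ofList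
    ((PySem.List.pyRange 1 p 1).filter
      (fun x => PySem.Int.powMod x (PySem.Int.floordiv (p - 1) 2).toNat p == 1))

theorem pvQr_contains (p n : Int) :
    PySem.Set.contains (pvQr p) n = true ↔
      (1 ≤ n ∧ n < p ∧ PySem.Int.powMod n (PySem.Int.floordiv (p - 1) 2).toNat p = 1) := by
  unfold pvQr
  rw [show PySem.Set.contains (PySem.Set.ofList _) n = List.contains (PySem.Set.ofList _) n from rfl]
  rw [List.contains_iff_mem, PySem.Set.mem_ofList, List.mem_filter]
  simp [PySem.List.mem_pyRange_one, and_assoc]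

-- the two inner-loop bodies, named for the congruence step (definitionally equal to the ports' bodies)
def pvBodyA (fd hd : PySem.Dict Int Int) (p g a b count : Int) : Int :=
  let x := (a, b)
  let fv := eval_poly_fp2_fast fd x p g
  let hv := eval_poly_fp2_fast hd x p g
  let h2 := fp2_mul hv hv p g
  let f4 := (PySem.Int.mod (4 * fv.1) p, PySem.Int.mod (4 * fv.2) p)
  let disc := fp2_add h2 f4 p
  if disc.1 = 0 ∧ disc.2 = 0 then count + 1
  else
    let norm := PySem.Int.mod (disc.1 * disc.1 - g * disc.2 * disc.2) p
    if norm = 0 then count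
    else if PySem.List.pyGet? (pvLsTable p) norm = some 1 then count + 2
    else count

def pvBodyB (fd hd : PySem.Dict Int Int) (p g a b count : Int) : Int :=
  let dd := polyAdd (polyMul (denseOf hd) (denseOf hd)) ((denseOf fd).map (fun c => 4 * c))
  let r := dd.reverse.foldl
    (fun r c => (PySem.Int.mod (r.1 * a + g * r.2 * b + c) p,
                 PySem.Int.mod (r.1 * b + r.2 * a) p)) ((0 : Int), (0 : Int))
  if r.1 = 0 ∧ r.2 = 0 then count + 1
  else if PySem.Set.contains (pvQr p) (PySem.Int.mod (r.1 * r.1 - g * r.2 * r.2) p) then count + 2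
  else count

theorem pvDisc_eq (fd hd : PySem.Dict Int Int) (p g a b : Int) (hp : 0 < p) :
    fp2_add (fp2_mul (eval_poly_fp2_fast hd (a, b) p g) (eval_poly_fp2_fast hd (a, b) p g) p g)
      (PySem.Int.mod (4 * (eval_poly_fp2_fast fd (a, b) p g).1) p,
       PySem.Int.mod (4 * (eval_poly_fp2_fast fd (a, b) p g).2) p) p =
    (polyAdd (polyMul (denseOf hd) (denseOf hd)) ((denseOf fd).map (fun c => 4 * c))).reverse.foldl
      (pvStepB p g a b) ((0 : Int), (0 : Int)) := by
  rw [pvEvalA_eq fd p g a b hp, pvEvalA_eq hd p g a b hp,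
    pvHorner_eq_evalZ p g a b hp, pvHorner_eq_evalZ p g a b hp, pvHorner_eq_evalZ p g a b hp,
    pvEvalZ_polyAdd, pvEvalZ_polyMul, pvEvalZ_map_mul]
  unfold fp2_add fp2_mul
  simp only [Prod.mk.injEq]
  constructor
  · apply pvMod_congr hp
    refine Int.ModEq.add ?_ ?_
    · exact (pvModEq_mod hp _).trans
        (((pvModEq_mod hp _).mul (pvModEq_mod hp _)).add
          (((pvModEq_mod hp _).mul_left g).mul (pvModEq_mod hp _)))
    · exact (pvModEq_mod hp _).trans ((pvModEq_mod hp _).mul_left 4)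
  · apply pvMod_congr hp
    refine Int.ModEq.add ?_ ?_
    · exact (pvModEq_mod hp _).trans
        (((pvModEq_mod hp _).mul (pvModEq_mod hp _)).add
          ((pvModEq_mod hp _).mul (pvModEq_mod hp _)))
    · exact (pvModEq_mod hp _).trans ((pvModEq_mod hp _).mul_left 4)

theorem pvBody_eq (fd hd : PySem.Dict Int Int) (p g a b : Int) (hp : 0 < p) (count : Int) :
    pvBodyA fd hd p g a b count = pvBodyB fd hd p g a b count := by
  unfold pvBodyA pvBodyB
  dsimp only
  rw [show (fun (r : Int × Int) (c : Int) =>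
      (PySem.Int.mod (r.1 * a + g * r.2 * b + c) p,
       PySem.Int.mod (r.1 * b + r.2 * a) p)) = pvStepB p g a b from rfl]
  rw [← pvDisc_eq fd hd p g a b hp]
  set disc := fp2_add (fp2_mul (eval_poly_fp2_fast hd (a, b) p g) (eval_poly_fp2_fast hd (a, b) p g) p g)
      (PySem.Int.mod (4 * (eval_poly_fp2_fast fd (a, b) p g).1) p,
       PySem.Int.mod (4 * (eval_poly_fp2_fast fd (a, b) p g).2) p) p with hdisc
  set N := PySem.Int.mod (disc.1 * disc.1 - g * disc.2 * disc.2) p with hN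
  have hN0 : 0 ≤ N := PySem.Int.mod_nonneg _ hp
  have hNp : N < p := PySem.Int.mod_lt _ hp
  by_cases h00 : disc.1 = 0 ∧ disc.2 = 0
  · rw [if_pos h00, if_pos h00]
  · rw [if_neg h00, if_neg h00]
    by_cases hNz : N = 0
    · rw [if_pos hNz]
      have hc : PySem.Set.contains (pvQr p) N ≠ true := by
        intro hcontr
        obtain ⟨h1, _, _⟩ := (pvQr_contains p N).mp hcontr
        omega
      rw [if_neg hc]
    · rw [if_neg hNz, pvLsTable_get p N hp hN0 hNp, if_neg hNz]
      unfold pvLsVal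
      by_cases hq : PySem.Int.powMod N (PySem.Int.floordiv (p - 1) 2).toNat p = 1
      · rw [if_pos hq]
        have hc : PySem.Set.contains (pvQr p) N = true :=
          (pvQr_contains p N).mpr ⟨by omega, hNp, hq⟩
        rw [if_pos hc, if_pos rfl]
      · rw [if_neg hq]
        have hc : PySem.Set.contains (pvQr p) N ≠ true := by
          intro hcontr
          exact hq ((pvQr_contains p N).mp hcontr).2.2
        rw [if_neg hc, if_neg (by decide : ¬ (some (-1 : Int) = some 1))]

-- ===== VERDICT (by name: the statement is the Claim_ definition above) =====
theorem count_fp2_affine_fast_spec : Claim_equal_count_fp2_affine_fast := by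
  intro f_coeffs h_coeffs p g _
  unfold Spec_count_fp2_affine_fast
  by_cases hple : p ≤ 0
  · simp [count_fp2_affine_fast, count_fp2_affine_fast_alt, PySem.List.pyRange_one_eq_nil hple]
  · have hp : 0 < p := by omega
    unfold count_fp2_affine_fast count_fp2_affine_fast_alt
    apply PySem.List.foldl_congr_mem
    intro count a _
    apply PySem.List.foldl_congr_mem
    intro count' b _
    exact pvBody_eq (PySem.Dict.ofList f_coeffs) (PySem.Dict.ofList h_coeffs) p g a b hp count'
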